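-- pv_equiv track=rewrite | github.com/Anishkumarpandey757/semantic1b | text2sql/src/create_hybrid_dataset.py | generate_anti_join_synthetic
-- ===== SOURCE A (Python) =====
-- from typing import List, Dict
--
-- def generate_anti_join_synthetic(num_needed: int, pattern: str) -> List[Dict]:
--     """Generate synthetic anti-join examples"""
--     examples = []
--
--     templates = {
--         'anti_join_not_exists': [
--             ('Which students have never enrolled in any course?',
--              'SELECT name FROM Student s WHERE NOT EXISTS (SELECT 1 FROM Enrollment e WHERE s.student_id = e.student_id);',
--              'Student(student_id PK, name VARCHAR, age INT, major VARCHAR, gpa FLOAT);\nEnrollment(enrollment_id PK, student_id FK, course_id FK, grade VARCHAR);'),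
--             ('Find products that have never been ordered',
--              'SELECT product_name FROM Product p WHERE NOT EXISTS (SELECT 1 FROM OrderItem oi WHERE p.product_id = oi.product_id);',
--              'Product(product_id PK, product_name VARCHAR, price DECIMAL, category VARCHAR);\nOrderItem(item_id PK, order_id FK, product_id FK, quantity INT);'),
--             ('List employees who have not worked on any project',
--              'SELECT name FROM Employee e WHERE NOT EXISTS (SELECT 1 FROM Assignment a WHERE e.emp_id = a.emp_id);',
--              'Employee(emp_id PK, name VARCHAR, salary DECIMAL, dept_id FK);\nAssignment(assignment_id PK, emp_id FK, project_id FK, hours INT);'),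
--         ],
--         'anti_join_left_null': [
--             ('Which customers have no orders?',
--              'SELECT c.name FROM Customer c LEFT JOIN Order o ON c.customer_id = o.customer_id WHERE o.order_id IS NULL;',
--              'Customer(customer_id PK, name VARCHAR, email VARCHAR, city VARCHAR);\nOrder(order_id PK, customer_id FK, order_date DATE, total_amount DECIMAL);'),
--             ('Find books that have never been loaned',
--              'SELECT b.title FROM Book b LEFT JOIN Loan l ON b.book_id = l.book_id WHERE l.loan_id IS NULL;',
--              'Book(book_id PK, title VARCHAR, author VARCHAR, isbn VARCHAR);\nLoan(loan_id PK, book_id FK, member_id FK, loan_date DATE);'),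
--             ('Show departments with no employees',
--              'SELECT d.dept_name FROM Department d LEFT JOIN Employee e ON d.dept_id = e.dept_id WHERE e.emp_id IS NULL;',
--              'Department(dept_id PK, dept_name VARCHAR, location VARCHAR, budget DECIMAL);\nEmployee(emp_id PK, name VARCHAR, salary DECIMAL, dept_id FK);'),
--         ],
--         'anti_join_not_in': [
--             ('List students not enrolled in any course',
--              'SELECT name FROM Student WHERE student_id NOT IN (SELECT student_id FROM Enrollment);',
--              'Student(student_id PK, name VARCHAR, age INT, major VARCHAR);\nEnrollment(enrollment_id PK, student_id FK, course_id FK);'),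
--             ('Find products not in any order',
--              'SELECT product_name FROM Product WHERE product_id NOT IN (SELECT product_id FROM OrderItem);',
--              'Product(product_id PK, product_name VARCHAR, price DECIMAL);\nOrderItem(item_id PK, product_id FK, quantity INT);'),
--         ],
--     }
--
--     if pattern not in templates:
--         return []
--
--     for _ in range((num_needed // len(templates[pattern])) + 1):
--         for q, sql, schema in templates[pattern]:
--             if len(examples) >= num_needed:
--                 break
--             examples.append({
--                 'question': q,
--                 'SQL': sql,
--                 'db_schema': schema,
--             })
--
--     return examples[:num_needed]
-- ===== SOURCE B (Python) =====
-- from typing import List, Dict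
--
-- def generate_anti_join_synthetic(num_needed: int, pattern: str) -> List[Dict]:
--     """Generate synthetic anti-join examples"""
--     templates = {
--         'anti_join_not_exists': [
--             ('Which students have never enrolled in any course?',
--              'SELECT name FROM Student s WHERE NOT EXISTS (SELECT 1 FROM Enrollment e WHERE s.student_id = e.student_id);',
--              'Student(student_id PK, name VARCHAR, age INT, major VARCHAR, gpa FLOAT);\nEnrollment(enrollment_id PK, student_id FK, course_id FK, grade VARCHAR);'),
--             ('Find products that have never been ordered',
--              'SELECT product_name FROM Product p WHERE NOT EXISTS (SELECT 1 FROM OrderItem oi WHERE p.product_id = oi.product_id);',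
--              'Product(product_id PK, product_name VARCHAR, price DECIMAL, category VARCHAR);\nOrderItem(item_id PK, order_id FK, product_id FK, quantity INT);'),
--             ('List employees who have not worked on any project',
--              'SELECT name FROM Employee e WHERE NOT EXISTS (SELECT 1 FROM Assignment a WHERE e.emp_id = a.emp_id);',
--              'Employee(emp_id PK, name VARCHAR, salary DECIMAL, dept_id FK);\nAssignment(assignment_id PK, emp_id FK, project_id FK, hours INT);'),
--         ],
--         'anti_join_left_null': [
--             ('Which customers have no orders?',
--              'SELECT c.name FROM Customer c LEFT JOIN Order o ON c.customer_id = o.customer_id WHERE o.order_id IS NULL;',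
--              'Customer(customer_id PK, name VARCHAR, email VARCHAR, city VARCHAR);\nOrder(order_id PK, customer_id FK, order_date DATE, total_amount DECIMAL);'),
--             ('Find books that have never been loaned',
--              'SELECT b.title FROM Book b LEFT JOIN Loan l ON b.book_id = l.book_id WHERE l.loan_id IS NULL;',
--              'Book(book_id PK, title VARCHAR, author VARCHAR, isbn VARCHAR);\nLoan(loan_id PK, book_id FK, member_id FK, loan_date DATE);'),
--             ('Show departments with no employees',
--              'SELECT d.dept_name FROM Department d LEFT JOIN Employee e ON d.dept_id = e.dept_id WHERE e.emp_id IS NULL;',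
--              'Department(dept_id PK, dept_name VARCHAR, location VARCHAR, budget DECIMAL);\nEmployee(emp_id PK, name VARCHAR, salary DECIMAL, dept_id FK);'),
--         ],
--         'anti_join_not_in': [
--             ('List students not enrolled in any course',
--              'SELECT name FROM Student WHERE student_id NOT IN (SELECT student_id FROM Enrollment);',
--              'Student(student_id PK, name VARCHAR, age INT, major VARCHAR);\nEnrollment(enrollment_id PK, student_id FK, course_id FK);'),
--             ('Find products not in any order',
--              'SELECT product_name FROM Product WHERE product_id NOT IN (SELECT product_id FROM OrderItem);',
--              'Product(product_id PK, product_name VARCHAR, price DECIMAL);\nOrderItem(item_id PK, product_id FK, quantity INT);'),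
--         ],
--     }
--
--     tpls = templates.get(pattern)
--     if tpls is None:
--         return []
--     n = len(tpls)
--     return [
--         {'question': tpls[i % n][0], 'SQL': tpls[i % n][1], 'db_schema': tpls[i % n][2]}
--         for i in range(max(0, num_needed))
--     ]
-- ===== Notes on version B (the rewrite author's own statement) =====
-- stated objective: simpler
-- what changed: Replaced A's nested repeat-loop with break-on-count plus final slice by a single flat pass over output positions using modulo indexing into the template list.
import Mathlib
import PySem

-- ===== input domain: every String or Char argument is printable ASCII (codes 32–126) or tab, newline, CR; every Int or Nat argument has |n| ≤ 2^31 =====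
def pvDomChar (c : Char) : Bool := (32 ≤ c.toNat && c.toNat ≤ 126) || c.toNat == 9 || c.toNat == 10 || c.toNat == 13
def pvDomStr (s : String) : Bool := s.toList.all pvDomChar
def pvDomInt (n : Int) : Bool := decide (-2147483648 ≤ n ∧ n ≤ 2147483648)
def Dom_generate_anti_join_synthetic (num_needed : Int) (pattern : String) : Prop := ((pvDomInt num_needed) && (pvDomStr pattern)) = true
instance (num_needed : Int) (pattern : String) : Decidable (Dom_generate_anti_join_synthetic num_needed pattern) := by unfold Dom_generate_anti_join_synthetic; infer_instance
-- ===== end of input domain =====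

-- B replaces A's nested repeat-loop with break-on-count plus final slice by one flat
-- modulo-indexed pass over the output positions (objective: simpler).


-- shared data: the template dict literal both Pythons contain verbatim
def pvTemplates : PySem.Dict String (List (String × String × String)) :=
  PySem.Dict.mk
    [("anti_join_not_exists",
      [("Which students have never enrolled in any course?",
        "SELECT name FROM Student s WHERE NOT EXISTS (SELECT 1 FROM Enrollment e WHERE s.student_id = e.student_id);",
        "Student(student_id PK, name VARCHAR, age INT, major VARCHAR, gpa FLOAT);\nEnrollment(enrollment_id PK, student_id FK, course_id FK, grade VARCHAR);"),
       ("Find products that have never been ordered",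
        "SELECT product_name FROM Product p WHERE NOT EXISTS (SELECT 1 FROM OrderItem oi WHERE p.product_id = oi.product_id);",
        "Product(product_id PK, product_name VARCHAR, price DECIMAL, category VARCHAR);\nOrderItem(item_id PK, order_id FK, product_id FK, quantity INT);"),
       ("List employees who have not worked on any project",
        "SELECT name FROM Employee e WHERE NOT EXISTS (SELECT 1 FROM Assignment a WHERE e.emp_id = a.emp_id);",
        "Employee(emp_id PK, name VARCHAR, salary DECIMAL, dept_id FK);\nAssignment(assignment_id PK, emp_id FK, project_id FK, hours INT);")]),
     ("anti_join_left_null",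
      [("Which customers have no orders?",
        "SELECT c.name FROM Customer c LEFT JOIN Order o ON c.customer_id = o.customer_id WHERE o.order_id IS NULL;",
        "Customer(customer_id PK, name VARCHAR, email VARCHAR, city VARCHAR);\nOrder(order_id PK, customer_id FK, order_date DATE, total_amount DECIMAL);"),
       ("Find books that have never been loaned",
        "SELECT b.title FROM Book b LEFT JOIN Loan l ON b.book_id = l.book_id WHERE l.loan_id IS NULL;",
        "Book(book_id PK, title VARCHAR, author VARCHAR, isbn VARCHAR);\nLoan(loan_id PK, book_id FK, member_id FK, loan_date DATE);"),
       ("Show departments with no employees",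
        "SELECT d.dept_name FROM Department d LEFT JOIN Employee e ON d.dept_id = e.dept_id WHERE e.emp_id IS NULL;",
        "Department(dept_id PK, dept_name VARCHAR, location VARCHAR, budget DECIMAL);\nEmployee(emp_id PK, name VARCHAR, salary DECIMAL, dept_id FK);")]),
     ("anti_join_not_in",
      [("List students not enrolled in any course",
        "SELECT name FROM Student WHERE student_id NOT IN (SELECT student_id FROM Enrollment);",
        "Student(student_id PK, name VARCHAR, age INT, major VARCHAR);\nEnrollment(enrollment_id PK, student_id FK, course_id FK);"),
       ("Find products not in any order",
        "SELECT product_name FROM Product WHERE product_id NOT IN (SELECT product_id FROM OrderItem);",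
        "Product(product_id PK, product_name VARCHAR, price DECIMAL);\nOrderItem(item_id PK, product_id FK, quantity INT);")])]

-- ===== PORT A =====
-- 'examples.append({...})' for one template triple
def pvMk (t : String × String × String) : List (String × String) :=
  [("question", t.1), ("SQL", t.2.1), ("db_schema", t.2.2)]

-- inner 'for q, sql, schema in templates[pattern]: if len(examples) >= num_needed: break; examples.append(...)'
def pvInnerA (n : Int) : List (String × String × String) → List (List (String × String)) → List (List (String × String))
  | [], acc => acc
  | t :: rest, acc =>
      if n ≤ (acc.length : Int) then acc
      else pvInnerA n rest (acc ++ [pvMk t])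

def generate_anti_join_synthetic (num_needed : Int) (pattern : String) : List (List (String × String)) :=
  match PySem.Dict.get? pvTemplates pattern with
  | none => []
  | some tpls =>
      let examples :=
        (PySem.List.pyRange 0 (PySem.Int.floordiv num_needed (tpls.length : Int) + 1)).foldl
          (fun acc _ => pvInnerA num_needed tpls acc) []
      PySem.List.slice examples none (some num_needed)

-- ===== PORT B =====
def generate_anti_join_synthetic_alt (num_needed : Int) (pattern : String) : List (List (String × String)) :=
  match PySem.Dict.get? pvTemplates pattern with
  | none => []
  | some tpls =>
      (PySem.List.pyRange 0 (max 0 num_needed)).map (fun i =>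
        let t := PySem.List.pyGetD tpls (PySem.Int.mod i (tpls.length : Int)) ("", "", "")
        [("question", t.1), ("SQL", t.2.1), ("db_schema", t.2.2)])

-- ===== PRECONDITION & SPEC =====
def Spec_generate_anti_join_synthetic (num_needed : Int) (pattern : String) (out : List (List (String × String))) : Prop := out = generate_anti_join_synthetic_alt num_needed pattern
instance (num_needed : Int) (pattern : String) (out : List (List (String × String))) : Decidable (Spec_generate_anti_join_synthetic num_needed pattern out) := by unfold Spec_generate_anti_join_synthetic; infer_instance

-- ===== CLAIM (what is proved, stated in full; the proofs are below) =====
def Claim_equal_generate_anti_join_synthetic : Prop := ∀ (num_needed : Int) (pattern : String), Dom_generate_anti_join_synthetic num_needed pattern → Spec_generate_anti_join_synthetic num_needed pattern (generate_anti_join_synthetic num_needed pattern)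

-- ===== LEMMAS AND PROOFS =====

-- a foldl that ignores the list elements is function iteration
theorem pv_foldl_const {α β : Type} (f : α → α) (l : List β) (init : α) :
    l.foldl (fun a _ => f a) init = f^[l.length] init := by
  induction l generalizing init with
  | nil => rfl
  | cons x xs ih => simp [List.foldl, ih, Function.iterate_succ_apply]

-- the inner break-loop appends templates until the count reaches n
theorem pv_inner_eq (n : Int) (tpls : List (String × String × String))
    (acc : List (List (String × String))) :
    pvInnerA n tpls acc = acc ++ (tpls.take (n - acc.length).toNat).map pvMk := by
  induction tpls generalizing acc with
  | nil => simp [pvInnerA]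
  | cons t rest ih =>
    by_cases h : n ≤ (acc.length : Int)
    · have : (n - acc.length).toNat = 0 := by omega
      simp [pvInnerA, h, this]
    · have hd : (n - acc.length).toNat = (n - ((acc ++ [pvMk t]).length : Int)).toNat + 1 := by
        simp; omega
      rw [pvInnerA, if_neg h, ih, hd]
      simp [List.take_succ_cons]

-- the value B computes for the first m positions
def pvOut (tpls : List (String × String × String)) (m : Nat) : List (List (String × String)) :=
  (List.range m).map (fun j => pvMk (tpls.getD (j % tpls.length) ("", "", "")))

theorem pv_take_map (tpls : List (String × String × String)) (r : Nat) (hr : r ≤ tpls.length) :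
    (tpls.take r).map pvMk = (List.range r).map (fun j => pvMk (tpls.getD j ("", "", ""))) := by
  apply List.ext_getElem
  · simp [hr]
  · intro i h1 h2
    simp at h1 h2 ⊢
    rw [List.getElem?_eq_getElem h1.2, Option.getD_some]

theorem pv_iter_eq (n : Int) (tpls : List (String × String × String)) (hne : tpls ≠ [])
    (k : Nat) :
    (fun acc => pvInnerA n tpls acc)^[k] [] = pvOut tpls (min (k * tpls.length) n.toNat) := by
  have hL : 0 < tpls.length := List.length_pos_iff.mpr hne
  induction k with
  | zero => simp [pvOut]
  | succ k ih =>
    rw [Function.iterate_succ_apply', ih, pv_inner_eq]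
    have hsucc : (k + 1) * tpls.length = k * tpls.length + tpls.length := by ring
    have hlen : (pvOut tpls (min (k * tpls.length) n.toNat)).length
        = min (k * tpls.length) n.toNat := by simp [pvOut]
    rw [hlen]
    have hnat : (n - ((min (k * tpls.length) n.toNat : Nat) : Int)).toNat
        = n.toNat - min (k * tpls.length) n.toNat := by omega
    rw [hnat]
    rcases Nat.le_total n.toNat (k * tpls.length) with hc | hc
    · -- already full: nothing is appended
      have h1 : min (k * tpls.length) n.toNat = n.toNat := by omega
      have h2 : min ((k + 1) * tpls.length) n.toNat = n.toNat := by omega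
      rw [h1, h2]
      simp
    · -- the k-th pass appends r more templates
      have h1 : min (k * tpls.length) n.toNat = k * tpls.length := by omega
      rw [h1]
      have htake : tpls.take (n.toNat - k * tpls.length)
          = tpls.take (min tpls.length (n.toNat - k * tpls.length)) := by
        rw [List.take_eq_take_iff]; omega
      have hr : min tpls.length (n.toNat - k * tpls.length) ≤ tpls.length := by omega
      have hmr : min ((k + 1) * tpls.length) n.toNat
          = k * tpls.length + min tpls.length (n.toNat - k * tpls.length) := by omega
      rw [htake, pv_take_map tpls _ hr, hmr]
      simp only [pvOut, List.range_add, List.map_append, List.map_map]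
      congr 1
      apply List.map_congr_left
      intro j hj
      simp only [List.mem_range] at hj
      simp only [Function.comp_apply]
      have : (k * tpls.length + j) % tpls.length = j := by
        rw [Nat.add_comm, Nat.add_mul_mod_self_right, Nat.mod_eq_of_lt (by omega)]
      rw [this]

-- main equivalence for one non-empty template list
theorem pv_main (n : Int) (tpls : List (String × String × String)) (hne : tpls ≠ []) :
    PySem.List.slice
      ((PySem.List.pyRange 0 (PySem.Int.floordiv n (tpls.length : Int) + 1)).foldl
        (fun acc _ => pvInnerA n tpls acc) []) none (some n)
    = (PySem.List.pyRange 0 (max 0 n)).map (fun i =>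
        let t := PySem.List.pyGetD tpls (PySem.Int.mod i (tpls.length : Int)) ("", "", "")
        [("question", t.1), ("SQL", t.2.1), ("db_schema", t.2.2)]) := by
  have hL : 0 < tpls.length := List.length_pos_iff.mpr hne
  have hLi : (0 : Int) < (tpls.length : Int) := by exact_mod_cast hL
  -- B's side is pvOut tpls n.toNat
  have hB : (PySem.List.pyRange 0 (max 0 n)).map (fun i =>
        let t := PySem.List.pyGetD tpls (PySem.Int.mod i (tpls.length : Int)) ("", "", "")
        [("question", t.1), ("SQL", t.2.1), ("db_schema", t.2.2)]) = pvOut tpls n.toNat := by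
    rw [PySem.List.pyRange_zero, List.map_map, pvOut]
    have hmax : (max 0 n).toNat = n.toNat := by omega
    rw [hmax]
    apply List.map_congr_left
    intro j _
    simp only [Function.comp_apply]
    rw [PySem.Int.mod_natCast, PySem.List.pyGetD_natCast, pvMk]
  rw [hB, pv_foldl_const, PySem.List.length_pyRange_one]
  have hfd : PySem.Int.floordiv n (tpls.length : Int) = n / (tpls.length : Int) :=
    PySem.Int.floordiv_eq_ediv_of_pos hLi
  have hdm := Int.mul_ediv_add_emod n (tpls.length : Int)
  have hmod := Int.emod_nonneg n (by omega : (tpls.length : Int) ≠ 0)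
  -- name the quotient and remainder so the facts about them are linear
  obtain ⟨Q, hQ⟩ : ∃ Q, n / (tpls.length : Int) = Q := ⟨_, rfl⟩
  obtain ⟨R, hR⟩ : ∃ R, n % (tpls.length : Int) = R := ⟨_, rfl⟩
  rw [hQ, hR] at hdm
  rw [hR] at hmod
  have hmlt := Int.emod_lt_of_pos n hLi
  rw [hR] at hmlt
  rw [hQ] at hfd
  by_cases hn : 0 ≤ n
  · -- enough outer iterations: the fold produces exactly n.toNat items
    have hq : 0 ≤ Q := by rw [← hQ]; exact Int.ediv_nonneg hn (by omega)
    have h1 : ((PySem.Int.floordiv n (tpls.length : Int) + 1 - 0).toNat : Int)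
        = Q + 1 := by rw [hfd]; omega
    have hkL : n.toNat
        ≤ (PySem.Int.floordiv n (tpls.length : Int) + 1 - 0).toNat * tpls.length := by
      have h2 : (((PySem.Int.floordiv n (tpls.length : Int) + 1 - 0).toNat
          * tpls.length : Nat) : Int)
          = (tpls.length : Int) * Q + (tpls.length : Int) := by push_cast; rw [h1]; ring
      omega
    rw [pv_iter_eq n tpls hne, Nat.min_eq_right hkL, PySem.List.slice_to _ hn]
    apply List.take_of_length_le
    simp [pvOut]
  · -- n < 0: zero outer iterations, both sides empty
    have hdivneg : Q < 0 := by
      have h1 : (tpls.length : Int) * Q < 0 := by omega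
      by_contra hc
      rw [Int.not_lt] at hc
      have := mul_nonneg (le_of_lt hLi) hc
      omega
    have hk0 : (PySem.Int.floordiv n (tpls.length : Int) + 1 - 0).toNat = 0 := by
      rw [hfd]; omega
    rw [hk0]
    have hout : pvOut tpls n.toNat = [] := by
      have : n.toNat = 0 := by omega
      simp [pvOut, this]
    rw [hout, Function.iterate_zero_apply]
    simp [PySem.List.slice]

-- a template list looked up in the dict literal is non-empty
theorem pv_tpls_ne (p : String) (tpls : List (String × String × String))
    (h : PySem.Dict.get? pvTemplates p = some tpls) : tpls ≠ [] := by
  intro hnil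
  subst hnil
  have hm := PySem.Dict.mem_items_of_get?_eq_some pvTemplates h
  simp [pvTemplates] at hm

-- ===== VERDICT (by name: the statement is the Claim_ definition above) =====
theorem generate_anti_join_synthetic_spec : Claim_equal_generate_anti_join_synthetic := by
  intro n p _
  unfold Spec_generate_anti_join_synthetic
  unfold generate_anti_join_synthetic generate_anti_join_synthetic_alt
  cases hg : PySem.Dict.get? pvTemplates p with
  | none => rfl
  | some tpls => exact pv_main n tpls (pv_tpls_ne p tpls hg)
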